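-- pv_equiv track=rewrite | github.com/OTAKUWeBer/YumeAnime | api/providers/miruro/episodes.py | _pick_best_provider
-- ===== SOURCE A (Python) =====
-- from typing import Dict, Any, Optional, List
--
-- PROVIDER_PRIORITY = [
--     # Standard Miruro providers (best quality/reliability)
--     "jet", "arc", "kiwi", "zoro", "bee", "wco", "KUUDERE",
--
--     # Anidap / AnimeX shared HLS provider names
--     "miru", "mochi", "nuri", "yuki", "kami", "wave", "shiro", "koto", "pahe", "maze",
--     "gogo", "vee", "hop", "dune",
--     # AnimeX-only sub-servers
--     "uwu", "mimi", "zaza",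
-- ]
--
-- def _pick_best_provider(providers: Dict[str, Any]) -> Optional[str]:
--     """Pick the best available provider based on priority"""
--     if not providers:
--         return None
--     for name in PROVIDER_PRIORITY:
--         if name in providers and providers[name]:
--             provider_data = providers[name]
--             # Check it has episodes
--             if isinstance(provider_data, dict):
--                 if provider_data.get("episodes") or provider_data.get("meta"):
--                     return name
--     # Fallback: first provider with data
--     for name, data in providers.items():
--         if isinstance(data, dict) and (data.get("episodes") or data.get("meta")):
--             return name
--     return None
-- ===== SOURCE B (Python) =====
-- from typing import Dict, Any, Optional
--
-- PROVIDER_PRIORITY = [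
--     "jet", "arc", "kiwi", "zoro", "bee", "wco", "KUUDERE",
--     "miru", "mochi", "nuri", "yuki", "kami", "wave", "shiro", "koto", "pahe", "maze",
--     "gogo", "vee", "hop", "dune",
--     "uwu", "mimi", "zaza",
-- ]
--
-- def _has_data(data):
--     return bool(data.get("episodes")) or bool(data.get("meta"))
--
-- def _pick_best_provider(providers: Dict[str, Any]) -> Optional[str]:
--     """Pick the best available provider: single pass keeping the lowest-rank valid one."""
--     rank = {name: i for i, name in enumerate(PROVIDER_PRIORITY)}
--     fallback = len(PROVIDER_PRIORITY)
--     best = None  # (rank, name)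
--     for name, data in providers.items():
--         if isinstance(data, dict) and _has_data(data):
--             r = rank.get(name, fallback)
--             if best is None or r < best[0]:
--                 best = (r, name)
--     return best[1] if best is not None else None
-- ===== Notes on version B (the rewrite author's own statement) =====
-- stated objective: simpler
-- what changed: Replaces A's two sequential scans (walk the 24-name priority list probing the dict, then a fallback scan in insertion order) by one pass over providers.items() keeping the candidate with the strictly smallest precomputed rank (unlisted names share the maximal rank, strict '<' preserves insertion-order tie-breaking).
import Mathlib
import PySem

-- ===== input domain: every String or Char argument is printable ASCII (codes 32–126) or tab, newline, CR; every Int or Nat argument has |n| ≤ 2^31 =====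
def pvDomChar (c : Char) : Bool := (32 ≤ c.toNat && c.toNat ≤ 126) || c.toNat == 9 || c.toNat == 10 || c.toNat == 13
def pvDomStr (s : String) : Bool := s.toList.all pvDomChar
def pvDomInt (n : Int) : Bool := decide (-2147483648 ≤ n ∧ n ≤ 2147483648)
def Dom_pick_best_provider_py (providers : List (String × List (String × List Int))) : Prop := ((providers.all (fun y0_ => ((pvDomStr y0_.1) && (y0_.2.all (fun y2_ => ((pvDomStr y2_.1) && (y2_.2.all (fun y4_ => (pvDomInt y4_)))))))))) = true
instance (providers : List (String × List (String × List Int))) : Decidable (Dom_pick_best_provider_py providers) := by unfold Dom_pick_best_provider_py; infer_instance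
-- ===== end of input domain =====

-- B replaces A's two sequential scans (priority list then insertion-order fallback) by one
-- pass over the dict keeping the candidate of strictly smallest rank (objective: simpler).

-- ===== PORT A =====
def PROVIDER_PRIORITY : List String :=
  ["jet", "arc", "kiwi", "zoro", "bee", "wco", "KUUDERE",
   "miru", "mochi", "nuri", "yuki", "kami", "wave", "shiro", "koto", "pahe", "maze",
   "gogo", "vee", "hop", "dune",
   "uwu", "mimi", "zaza"]

-- truthiness of `provider_data.get("episodes") or provider_data.get("meta")` in A
def pvHasDataA (d : List (String × List Int)) : Bool :=
  (match (PySem.Dict.mk d).get? "episodes" with | some l => !l.isEmpty | none => false)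
  || (match (PySem.Dict.mk d).get? "meta" with | some l => !l.isEmpty | none => false)

-- body of A's `for name in PROVIDER_PRIORITY` loop (isinstance(provider_data, dict) is always true here by typing)
def pvPrioCheck (providers : List (String × List (String × List Int))) (name : String) : Option String :=
  match (PySem.Dict.mk providers).get? name with
  | some d => if !d.isEmpty && pvHasDataA d then some name else none
  | none => none

-- body of A's fallback `for name, data in providers.items()` loop
def pvFallbackCheck (nd : String × List (String × List Int)) : Option String :=
  if pvHasDataA nd.2 then some nd.1 else none

def pick_best_provider_py (providers : List (String × List (String × List Int))) : Option String :=
  if providers.isEmpty then none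
  else
    match PROVIDER_PRIORITY.findSome? (pvPrioCheck providers) with
    | some name => some name
    | none => providers.findSome? pvFallbackCheck

-- ===== PORT B =====
-- rank = {name: i for i, name in enumerate(PROVIDER_PRIORITY)}
def pvRankDict : PySem.Dict String Int :=
  (PySem.List.enumerate PROVIDER_PRIORITY).foldl (fun d p => d.insert p.2 p.1) PySem.Dict.empty

-- _has_data(data) = bool(data.get("episodes")) or bool(data.get("meta"))
def pvHasDataB (d : List (String × List Int)) : Bool :=
  !((PySem.Dict.mk d).getD "episodes" []).isEmpty || !((PySem.Dict.mk d).getD "meta" []).isEmpty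

-- one iteration of B's loop: keep the (rank, name) candidate with strictly smallest rank
def pvBestStep (best : Option (Int × String)) (nd : String × List (String × List Int)) :
    Option (Int × String) :=
  if pvHasDataB nd.2 then
    let r := pvRankDict.getD nd.1 (PROVIDER_PRIORITY.length : Int)
    match best with
    | none => some (r, nd.1)
    | some b => if r < b.1 then some (r, nd.1) else some b
  else best

def pick_best_provider_py_alt (providers : List (String × List (String × List Int))) : Option String :=
  (providers.foldl pvBestStep none).map (·.2)

-- ===== PRECONDITION & SPEC =====
-- Pre_ excludes association lists with duplicate outer keys: they do not represent any Python
-- dict (dict construction collapses duplicates), and on them the two list traversals may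
-- legitimately differ.
def Pre_pick_best_provider_py (providers : List (String × List (String × List Int))) : Prop :=
  (providers.map Prod.fst).Nodup

instance (providers : List (String × List (String × List Int))) : Decidable (Pre_pick_best_provider_py providers) := by unfold Pre_pick_best_provider_py; infer_instance

def pvWitness_pick_best_provider_py : (List (String × List (String × List Int))) :=
  [("zzz", [("episodes", [1])]), ("jet", [("meta", [2])])]

def Spec_pick_best_provider_py (providers : List (String × List (String × List Int))) (out : Option String) : Prop := out = pick_best_provider_py_alt providers
instance (providers : List (String × List (String × List Int))) (out : Option String) : Decidable (Spec_pick_best_provider_py providers out) := by unfold Spec_pick_best_provider_py; infer_instance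

-- ===== CLAIM (what is proved, stated in full; the proofs are below) =====
def Claim_equal_pick_best_provider_py : Prop := ∀ (providers : List (String × List (String × List Int))), Dom_pick_best_provider_py providers → Pre_pick_best_provider_py providers → Spec_pick_best_provider_py providers (pick_best_provider_py providers)

-- ===== LEMMAS AND PROOFS =====

lemma pvWitness_ok : Dom_pick_best_provider_py pvWitness_pick_best_provider_py ∧
    Pre_pick_best_provider_py pvWitness_pick_best_provider_py := by decide

-- the two validity predicates agree
lemma pvHasData_eq (d : List (String × List Int)) : pvHasDataB d = pvHasDataA d := by
  unfold pvHasDataA pvHasDataB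
  rw [PySem.Dict.getD_eq_get?_getD, PySem.Dict.getD_eq_get?_getD]
  cases (PySem.Dict.mk d).get? "episodes" <;> cases (PySem.Dict.mk d).get? "meta" <;> simp

-- a dict with data is nonempty, so A's truthiness test is redundant
lemma pvCondA_eq (d : List (String × List Int)) : (!d.isEmpty && pvHasDataA d) = pvHasDataA d := by
  cases d with
  | nil => decide
  | cons h t => simp [List.isEmpty]

-- rank of a name: what B looks up
def pvRank (n : String) : Int := pvRankDict.getD n (PROVIDER_PRIORITY.length : Int)

lemma pvGetD_foldl_insert_snd_not_mem (l : List (Int × String)) (d : PySem.Dict String Int)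
    (n : String) (df : Int) (h : n ∉ l.map (·.2)) :
    (l.foldl (fun d p => d.insert p.2 p.1) d).getD n df = d.getD n df := by
  induction l generalizing d with
  | nil => rfl
  | cons p t ih =>
    simp only [List.map_cons, List.mem_cons, not_or] at h
    simp only [List.foldl_cons]
    rw [ih _ h.2, PySem.Dict.getD_insert_of_ne _ _ _ h.1]

lemma pvRank_not_mem (n : String) (h : n ∉ PROVIDER_PRIORITY) :
    pvRank n = (PROVIDER_PRIORITY.length : Int) := by
  unfold pvRank pvRankDict
  rw [pvGetD_foldl_insert_snd_not_mem]
  · exact PySem.Dict.getD_empty n _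
  · rw [PySem.List.map_snd_enumerate]
    exact h

lemma pvRank_getElem : ∀ i : Fin PROVIDER_PRIORITY.length,
    pvRank (PROVIDER_PRIORITY[(i : Nat)]) = ((i : Nat) : Int) := by decide

lemma pvRank_mem (n : String) (h : n ∈ PROVIDER_PRIORITY) :
    pvRank n = (PROVIDER_PRIORITY.idxOf n : Int) := by
  have hlt := List.idxOf_lt_length_of_mem h
  have := pvRank_getElem ⟨PROVIDER_PRIORITY.idxOf n, hlt⟩
  rwa [List.getElem_idxOf hlt] at this

-- merge of two candidates: strict '<' keeps the left one on ties
def pvMerge : Option (Int × String) → Option (Int × String) → Option (Int × String)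
  | none, y => y
  | some b, none => some b
  | some b, some c => if c.1 < b.1 then some c else some b

lemma pvMerge_assoc (a b c : Option (Int × String)) :
    pvMerge (pvMerge a b) c = pvMerge a (pvMerge b c) := by
  rcases a with _ | a
  · rfl
  rcases b with _ | b
  · cases c <;> rfl
  rcases c with _ | c
  · simp only [pvMerge]
    split_ifs <;> rfl
  · simp only [pvMerge]
    split_ifs
    all_goals first
      | rfl
      | (simp only [pvMerge]; split_ifs <;> first | rfl | (exfalso; omega))

lemma pvBestStep_merge (acc : Option (Int × String)) (nd : String × List (String × List Int)) :
    pvBestStep acc nd = pvMerge acc (pvBestStep none nd) := by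
  unfold pvBestStep
  by_cases h : pvHasDataB nd.2 = true <;> rcases acc with _ | b <;> simp [h, pvMerge]

def pvFm (l : List (String × List (String × List Int))) : Option (Int × String) :=
  l.foldl pvBestStep none

lemma pvFoldl_merge (l : List (String × List (String × List Int)))
    (acc : Option (Int × String)) : l.foldl pvBestStep acc = pvMerge acc (pvFm l) := by
  induction l generalizing acc with
  | nil => cases acc <;> rfl
  | cons nd t ih =>
    show List.foldl pvBestStep (pvBestStep acc nd) t = _
    rw [ih, pvBestStep_merge, pvMerge_assoc]
    have h2 : pvFm (nd :: t) = pvMerge (pvBestStep none nd) (pvFm t) := by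
      show List.foldl pvBestStep (pvBestStep none nd) t = _
      rw [ih]
    rw [h2]

lemma pvFm_cons (nd : String × List (String × List Int))
    (t : List (String × List (String × List Int))) :
    pvFm (nd :: t) = pvMerge (pvBestStep none nd) (pvFm t) := by
  show List.foldl pvBestStep (pvBestStep none nd) t = _
  rw [pvFoldl_merge]

lemma pvBestStep_none_pos (nd : String × List (String × List Int))
    (hv : pvHasDataB nd.2 = true) : pvBestStep none nd = some (pvRank nd.1, nd.1) := by
  simp [pvBestStep, hv, pvRank]

lemma pvBestStep_none_neg (nd : String × List (String × List Int))
    (hv : pvHasDataB nd.2 = false) : pvBestStep none nd = none := by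
  simp [pvBestStep, hv]

lemma pvFm_mem (l : List (String × List (String × List Int))) (r : Int) (n : String)
    (h : pvFm l = some (r, n)) :
    ∃ e, (n, e) ∈ l ∧ pvHasDataB e = true ∧ r = pvRank n := by
  induction l with
  | nil => cases h
  | cons nd t ih =>
    rw [pvFm_cons] at h
    cases hv : pvHasDataB nd.2 with
    | false =>
      rw [pvBestStep_none_neg nd hv, show pvMerge none (pvFm t) = pvFm t from rfl] at h
      obtain ⟨e, he, hv', hr⟩ := ih h
      exact ⟨e, List.mem_cons_of_mem _ he, hv', hr⟩
    | true =>
      rw [pvBestStep_none_pos nd hv] at h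
      rcases hfm : pvFm t with _ | b <;> rw [hfm] at h
      · cases h
        exact ⟨nd.2, List.mem_cons_self, hv, rfl⟩
      · rcases b with ⟨br, bn⟩
        simp only [pvMerge] at h
        split_ifs at h
        · cases h
          obtain ⟨e, he, hv', hr⟩ := ih hfm
          exact ⟨e, List.mem_cons_of_mem _ he, hv', hr⟩
        · cases h
          exact ⟨nd.2, List.mem_cons_self, hv, rfl⟩

-- unique strict minimum: the fold returns it
lemma pvFm_min (l : List (String × List (String × List Int))) (p : String)
    (d : List (String × List Int))
    (hnd : (l.map Prod.fst).Nodup) (hmem : (p, d) ∈ l) (hv : pvHasDataB d = true)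
    (hmin : ∀ q e, (q, e) ∈ l → pvHasDataB e = true → pvRank p < pvRank q ∨ q = p) :
    pvFm l = some (pvRank p, p) := by
  induction l with
  | nil => cases hmem
  | cons nd t ih =>
    simp only [List.map_cons, List.nodup_cons] at hnd
    rw [pvFm_cons]
    rcases List.mem_cons.mp hmem with heq | hmemt
    · -- head is (p, d)
      have hp : nd.1 = p := by rw [← heq]
      have hd : nd.2 = d := by rw [← heq]
      have hv' : pvHasDataB nd.2 = true := by rw [hd]; exact hv
      rw [pvBestStep_none_pos nd hv']
      rcases hfm : pvFm t with _ | b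
      · rw [show pvMerge (some (pvRank nd.1, nd.1)) none = some (pvRank nd.1, nd.1) from rfl, hp]
      · rcases b with ⟨br, bn⟩
        obtain ⟨e, he, hve, hre⟩ := pvFm_mem t br bn hfm
        rcases hmin bn e (List.mem_cons_of_mem _ he) hve with hlt | heq2
        · simp only [pvMerge]
          rw [if_neg (by rw [hp]; omega), hp]
        · exact absurd (by rw [← heq2] at hp; rw [hp]; exact List.mem_map_of_mem he) hnd.1
    · -- (p, d) in the tail
      have hpt : p ∈ t.map Prod.fst := List.mem_map_of_mem hmemt
      have ihr := ih hnd.2 hmemt (fun q e hq hve => hmin q e (List.mem_cons_of_mem _ hq) hve)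
      cases hvh : pvHasDataB nd.2 with
      | false =>
        rw [pvBestStep_none_neg nd hvh, show pvMerge none (pvFm t) = pvFm t from rfl]
        exact ihr
      | true =>
        rcases hmin nd.1 nd.2 List.mem_cons_self hvh with hlt | heq2
        · rw [pvBestStep_none_pos nd hvh, ihr]
          simp only [pvMerge]
          rw [if_pos hlt]
        · exact absurd (by rw [heq2]; exact hpt) hnd.1

-- all valid keys share a common rank c: the fold returns the first valid item
lemma pvFm_const (l : List (String × List (String × List Int))) (c : Int)
    (hall : ∀ q e, (q, e) ∈ l → pvHasDataB e = true → pvRank q = c) :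
    pvFm l = (l.findSome? pvFallbackCheck).map (fun n => (c, n)) := by
  induction l with
  | nil => rfl
  | cons nd t ih =>
    rw [pvFm_cons]
    have iht := ih (fun q e hq hve => hall q e (List.mem_cons_of_mem _ hq) hve)
    cases hv : pvHasDataB nd.2 with
    | true =>
      have hva : pvHasDataA nd.2 = true := by rw [← pvHasData_eq]; exact hv
      have hc : pvRank nd.1 = c := hall nd.1 nd.2 List.mem_cons_self hv
      have hfs : List.findSome? pvFallbackCheck (nd :: t) = some nd.1 := by
        simp [pvFallbackCheck, hva]
      rw [hfs, pvBestStep_none_pos nd hv, hc, iht]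
      rcases t.findSome? pvFallbackCheck with _ | n2
      · rfl
      · simp only [Option.map_some, pvMerge]
        rw [if_neg (lt_irrefl c)]
    | false =>
      have hva : pvHasDataA nd.2 = false := by rw [← pvHasData_eq]; exact hv
      have hfs : List.findSome? pvFallbackCheck (nd :: t) = t.findSome? pvFallbackCheck := by
        simp [pvFallbackCheck, hva]
      rw [hfs, pvBestStep_none_neg nd hv, show pvMerge none (pvFm t) = pvFm t from rfl]
      exact iht

-- A's priority-loop body hit: the found name is the scanned name, with a valid entry
lemma pvPrioCheck_some_elim (providers : List (String × List (String × List Int)))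
    (q x : String) (h : pvPrioCheck providers q = some x) :
    x = q ∧ ∃ d, (PySem.Dict.mk providers).get? q = some d ∧ pvHasDataA d = true := by
  unfold pvPrioCheck at h
  rcases hg : (PySem.Dict.mk providers).get? q with _ | d <;> rw [hg] at h
  · cases h
  · change (if (!d.isEmpty && pvHasDataA d) = true then some q else none) = some x at h
    by_cases hc : (!d.isEmpty && pvHasDataA d) = true
    · rw [if_pos hc] at h
      injection h with hqx
      rw [pvCondA_eq] at hc
      exact ⟨hqx.symm, d, rfl, hc⟩
    · rw [if_neg hc] at h
      cases h

lemma pvPrioCheck_some (providers : List (String × List (String × List Int)))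
    (q : String) (e : List (String × List Int))
    (hg : (PySem.Dict.mk providers).get? q = some e) (hv : pvHasDataA e = true) :
    pvPrioCheck providers q = some q := by
  unfold pvPrioCheck
  rw [hg]
  change (if (!e.isEmpty && pvHasDataA e) = true then some q else none) = some q
  rw [if_pos (by rw [pvCondA_eq]; exact hv)]

-- A's priority loop: a hit means a valid entry under the found name, which is in the list
lemma pvFS_hit (providers : List (String × List (String × List Int))) (Q : List String)
    (p : String) (h : Q.findSome? (pvPrioCheck providers) = some p) :
    p ∈ Q ∧ ∃ d, (PySem.Dict.mk providers).get? p = some d ∧ pvHasDataA d = true := by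
  obtain ⟨q, hq, hpc⟩ := List.exists_of_findSome?_eq_some h
  obtain ⟨hxq, hd⟩ := pvPrioCheck_some_elim providers q p hpc
  exact ⟨hxq ▸ hq, hxq ▸ hd⟩

-- A's priority loop finds the first hit: any other hit comes no earlier
lemma pvFS_first (providers : List (String × List (String × List Int))) (Q : List String)
    (p q : String) (h : Q.findSome? (pvPrioCheck providers) = some p) (hq : q ∈ Q)
    (hqhit : pvPrioCheck providers q ≠ none) : Q.idxOf p ≤ Q.idxOf q := by
  induction Q with
  | nil => cases hq
  | cons a t ih =>
    rcases hc : pvPrioCheck providers a with _ | x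
    · rw [List.findSome?_cons, hc] at h
      have hqa : q ≠ a := fun hh => hqhit (hh ▸ hc)
      have hqt : q ∈ t := (List.mem_cons.mp hq).resolve_left hqa
      have hpa : p ≠ a := by
        intro hh
        obtain ⟨_, d, hg, hv⟩ := pvFS_hit providers t p h
        have hs := pvPrioCheck_some providers p d hg hv
        rw [hh] at hs
        rw [hs] at hc
        cases hc
      rw [List.idxOf_cons_ne _ (Ne.symm hpa), List.idxOf_cons_ne _ (Ne.symm hqa)]
      exact Nat.succ_le_succ (ih h hqt)
    · rw [List.findSome?_cons, hc] at h
      injection h with hxp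
      rw [← hxp, (pvPrioCheck_some_elim providers a x hc).1, List.idxOf_cons_self]
      exact Nat.zero_le _

-- ===== VERDICT (by name: the statement is the Claim_ definition above) =====
theorem pick_best_provider_py_spec : Claim_equal_pick_best_provider_py := by
  intro providers hdom hpre
  unfold Spec_pick_best_provider_py
  have halt : pick_best_provider_py_alt providers = (pvFm providers).map (·.2) := rfl
  by_cases hE : providers = []
  · subst hE; rfl
  have hisE : providers.isEmpty = false := by
    cases providers with
    | nil => exact absurd rfl hE
    | cons a t => rfl
  unfold pick_best_provider_py
  rw [hisE]
  simp only [Bool.false_eq_true, if_false]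
  have hkeys : (PySem.Dict.mk providers).keys.Nodup := hpre
  rcases hfs : PROVIDER_PRIORITY.findSome? (pvPrioCheck providers) with _ | p
  · -- no priority provider hit: every valid key is unlisted, so all ranks equal |P|
    have hall : ∀ q e, (q, e) ∈ providers → pvHasDataB e = true →
        pvRank q = (PROVIDER_PRIORITY.length : Int) := by
      intro q e hq hve
      by_cases hqP : q ∈ PROVIDER_PRIORITY
      · exfalso
        have hgq : (PySem.Dict.mk providers).get? q = some e :=
          PySem.Dict.get?_of_mem_items _ hq hkeys
        have hsome := pvPrioCheck_some providers q e hgq (by rw [← pvHasData_eq]; exact hve)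
        have hnone := List.findSome?_eq_none_iff.mp hfs q hqP
        rw [hsome] at hnone
        cases hnone
      · exact pvRank_not_mem q hqP
    rw [halt, pvFm_const providers _ hall]
    cases providers.findSome? pvFallbackCheck <;> rfl
  · -- priority hit p: it is the unique valid key of minimal rank
    obtain ⟨hpP, d, hg, hv⟩ := pvFS_hit providers PROVIDER_PRIORITY p hfs
    have hmemA : (p, d) ∈ providers := PySem.Dict.mem_items_of_get?_eq_some _ hg
    have hvB : pvHasDataB d = true := by rw [pvHasData_eq]; exact hv
    have hmin : ∀ q e, (q, e) ∈ providers → pvHasDataB e = true →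
        pvRank p < pvRank q ∨ q = p := by
      intro q e hq hve
      by_cases hqP : q ∈ PROVIDER_PRIORITY
      · have hgq : (PySem.Dict.mk providers).get? q = some e :=
          PySem.Dict.get?_of_mem_items _ hq hkeys
        have hsome := pvPrioCheck_some providers q e hgq (by rw [← pvHasData_eq]; exact hve)
        have hle := pvFS_first providers PROVIDER_PRIORITY p q hfs hqP (by rw [hsome]; simp)
        rcases lt_or_eq_of_le hle with hlt | heq
        · left
          rw [pvRank_mem p hpP, pvRank_mem q hqP]
          exact_mod_cast hlt
        · right
          exact ((List.idxOf_inj hpP).mp heq).symm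
      · left
        rw [pvRank_not_mem q hqP, pvRank_mem p hpP]
        exact_mod_cast List.idxOf_lt_length_of_mem hpP
    rw [halt, pvFm_min providers p d hpre hmemA hvB hmin]
    rfl
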